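-- pv_equiv track=rewrite | github.com/gitpetyr/LightOTP_backend | config.py | strcheck
-- ===== SOURCE A (Python) =====
-- def strcheck(s: str):
--     if len(s) > 50:
--         return False
--     strset = "qwertyuiopasdfghjklzxcvbnmQWERTYUIOPASDFGHJKLZXCVBNM1234567890"
--     for i in s:
--         if i not in strset:
--             return False
--     return True
-- ===== SOURCE B (Python) =====
-- import re
--
-- _ALNUM = re.compile(r'[A-Za-z0-9]*')
--
-- def strcheck(s: str):
--     return len(s) <= 50 and _ALNUM.fullmatch(s) is not None
-- ===== Notes on version B (the rewrite author's own statement) =====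
-- stated objective: idiomatic
-- what changed: Replaced the explicit per-character loop over a 62-character literal alphabet with a compiled regex full-match against the ASCII class [A-Za-z0-9]* (using * so the empty string passes), keeping the length guard.
import Mathlib
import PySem

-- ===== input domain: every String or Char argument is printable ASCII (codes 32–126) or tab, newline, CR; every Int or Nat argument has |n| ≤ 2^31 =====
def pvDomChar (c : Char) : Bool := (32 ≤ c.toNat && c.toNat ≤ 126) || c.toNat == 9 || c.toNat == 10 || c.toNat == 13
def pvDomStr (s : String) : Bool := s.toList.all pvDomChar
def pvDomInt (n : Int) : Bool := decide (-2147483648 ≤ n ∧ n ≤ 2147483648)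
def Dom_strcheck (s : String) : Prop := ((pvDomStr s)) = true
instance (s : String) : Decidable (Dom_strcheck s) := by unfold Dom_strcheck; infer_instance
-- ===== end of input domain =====

-- B keeps A's length guard but replaces the explicit character loop over a 62-char
-- literal alphabet by one regex full-match against the class [A-Za-z0-9]* (idiomatic; same cost).

-- ===== PORT A =====
-- A's allowed-characters string literal
def strcheckSet : List Char := "qwertyuiopasdfghjklzxcvbnmQWERTYUIOPASDFGHJKLZXCVBNM1234567890".toList

-- 'for i in s: if i not in strset: return False'; for a single character i,
-- Python's 'i not in strset' is exactly non-membership of the char in strset's characters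
def strcheckLoop : List Char → Bool
  | [] => true
  | c :: rest => if strcheckSet.contains c = false then false else strcheckLoop rest

def strcheck (s : String) : Bool :=
  if PySem.Str.len s > 50 then false
  else strcheckLoop s.toList

-- ===== PORT B =====
-- re.fullmatch(r'[A-Za-z0-9]*', s) is not None ⟺ every char of s lies in the class
-- (exact: the regex is a pure character-class star over ASCII)
def strcheckClass (c : Char) : Bool :=
  ('A' ≤ c && c ≤ 'Z') || ('a' ≤ c && c ≤ 'z') || ('0' ≤ c && c ≤ '9')

def strcheck_alt (s : String) : Bool :=
  PySem.Str.len s ≤ 50 && s.toList.all strcheckClass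

-- ===== PRECONDITION & SPEC =====
def Spec_strcheck (s : String) (out : Bool) : Prop := out = strcheck_alt s
instance (s : String) (out : Bool) : Decidable (Spec_strcheck s out) := by unfold Spec_strcheck; infer_instance

-- ===== CLAIM (what is proved, stated in full; the proofs are below) =====
def Claim_equal_strcheck : Prop := ∀ (s : String), Dom_strcheck s → Spec_strcheck s (strcheck s)

-- ===== LEMMAS AND PROOFS =====

theorem char_eq_iff_toNat (c d : Char) : c = d ↔ c.toNat = d.toNat := by
  constructor
  · rintro rfl; rfl
  · intro h; exact Char.ext (UInt32.toNat_inj.mp h)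

theorem strcheck_mem_eq_class (c : Char) : strcheckSet.contains c = strcheckClass c := by
  rw [Bool.eq_iff_iff, List.contains_iff_mem]
  have hmem : strcheckSet = ['q','w','e','r','t','y','u','i','o','p','a','s','d','f','g','h','j','k','l','z','x','c','v','b','n','m','Q','W','E','R','T','Y','U','I','O','P','A','S','D','F','G','H','J','K','L','Z','X','C','V','B','N','M','1','2','3','4','5','6','7','8','9','0'] := by decide
  rw [hmem]
  simp only [List.mem_cons, List.not_mem_nil, or_false, char_eq_iff_toNat,
    strcheckClass, Bool.or_eq_true, Bool.and_eq_true, decide_eq_true_eq,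
    Char.le_def, UInt32.le_iff_toNat_le, Char.toNat]
  simp only [show ('q'.val.toNat) = 113 from rfl,
    show ('w'.val.toNat) = 119 from rfl,
    show ('e'.val.toNat) = 101 from rfl,
    show ('r'.val.toNat) = 114 from rfl,
    show ('t'.val.toNat) = 116 from rfl,
    show ('y'.val.toNat) = 121 from rfl,
    show ('u'.val.toNat) = 117 from rfl,
    show ('i'.val.toNat) = 105 from rfl,
    show ('o'.val.toNat) = 111 from rfl,
    show ('p'.val.toNat) = 112 from rfl,
    show ('a'.val.toNat) = 97 from rfl,
    show ('s'.val.toNat) = 115 from rfl,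
    show ('d'.val.toNat) = 100 from rfl,
    show ('f'.val.toNat) = 102 from rfl,
    show ('g'.val.toNat) = 103 from rfl,
    show ('h'.val.toNat) = 104 from rfl,
    show ('j'.val.toNat) = 106 from rfl,
    show ('k'.val.toNat) = 107 from rfl,
    show ('l'.val.toNat) = 108 from rfl,
    show ('z'.val.toNat) = 122 from rfl,
    show ('x'.val.toNat) = 120 from rfl,
    show ('c'.val.toNat) = 99 from rfl,
    show ('v'.val.toNat) = 118 from rfl,
    show ('b'.val.toNat) = 98 from rfl,
    show ('n'.val.toNat) = 110 from rfl,
    show ('m'.val.toNat) = 109 from rfl,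
    show ('Q'.val.toNat) = 81 from rfl,
    show ('W'.val.toNat) = 87 from rfl,
    show ('E'.val.toNat) = 69 from rfl,
    show ('R'.val.toNat) = 82 from rfl,
    show ('T'.val.toNat) = 84 from rfl,
    show ('Y'.val.toNat) = 89 from rfl,
    show ('U'.val.toNat) = 85 from rfl,
    show ('I'.val.toNat) = 73 from rfl,
    show ('O'.val.toNat) = 79 from rfl,
    show ('P'.val.toNat) = 80 from rfl,
    show ('A'.val.toNat) = 65 from rfl,
    show ('S'.val.toNat) = 83 from rfl,
    show ('D'.val.toNat) = 68 from rfl,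
    show ('F'.val.toNat) = 70 from rfl,
    show ('G'.val.toNat) = 71 from rfl,
    show ('H'.val.toNat) = 72 from rfl,
    show ('J'.val.toNat) = 74 from rfl,
    show ('K'.val.toNat) = 75 from rfl,
    show ('L'.val.toNat) = 76 from rfl,
    show ('Z'.val.toNat) = 90 from rfl,
    show ('X'.val.toNat) = 88 from rfl,
    show ('C'.val.toNat) = 67 from rfl,
    show ('V'.val.toNat) = 86 from rfl,
    show ('B'.val.toNat) = 66 from rfl,
    show ('N'.val.toNat) = 78 from rfl,
    show ('M'.val.toNat) = 77 from rfl,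
    show ('1'.val.toNat) = 49 from rfl,
    show ('2'.val.toNat) = 50 from rfl,
    show ('3'.val.toNat) = 51 from rfl,
    show ('4'.val.toNat) = 52 from rfl,
    show ('5'.val.toNat) = 53 from rfl,
    show ('6'.val.toNat) = 54 from rfl,
    show ('7'.val.toNat) = 55 from rfl,
    show ('8'.val.toNat) = 56 from rfl,
    show ('9'.val.toNat) = 57 from rfl,
    show ('0'.val.toNat) = 48 from rfl]
  omega

theorem strcheck_loop_eq_all (l : List Char) : strcheckLoop l = l.all strcheckClass := by
  induction l with
  | nil => rfl
  | cons c rest ih =>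
    simp only [strcheckLoop, List.all_cons, strcheck_mem_eq_class]
    cases h : strcheckClass c <;> simp [ih]

-- ===== VERDICT (by name: the statement is the Claim_ definition above) =====
theorem strcheck_spec : Claim_equal_strcheck := by
  intro s _
  unfold Spec_strcheck strcheck strcheck_alt
  rw [strcheck_loop_eq_all, PySem.Str.len_eq]
  simp only [String.length_toList]
  by_cases h : (50 : Int) < (s.length : Int)
  · rw [if_pos h]
    have : decide ((s.length : Int) ≤ 50) = false := by simp; omega
    rw [this, Bool.false_and]
  · rw [if_neg h]
    have : decide ((s.length : Int) ≤ 50) = true := by simp; omega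
    rw [this, Bool.true_and]
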